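-- pv_equiv track=rewrite | github.com/BimBlam/OBEC-Plotting-Standard | src/batteryplot/reader.py | _choose_sheet
-- ===== SOURCE A (Python) =====
-- def _choose_sheet(sheet_names: list[str]) -> str:
--     """
--     Pick the most likely data sheet from a list of sheet names.
--
--     Priority:
--     1. "Channel_*" (Maccor naming convention)
--     2. "Data", "Test", "Record" (common names)
--     3. First sheet
--     """
--     for name in sheet_names:
--         nl = name.lower()
--         if nl.startswith("channel"):
--             return name
--     for name in sheet_names:
--         nl = name.lower()
--         if nl in ("data", "test", "record", "results"):
--             return name
--     return sheet_names[0]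
-- ===== SOURCE B (Python) =====
-- def _choose_sheet(sheet_names: list[str]) -> str:
--     # Single pass: channel-prefixed names win immediately; the first
--     # common-name match is kept as a fallback and only used after the scan.
--     fallback = None
--     for name in sheet_names:
--         nl = name.lower()
--         if nl.startswith("channel"):
--             return name
--         if fallback is None and nl in ("data", "test", "record", "results"):
--             fallback = name
--     return fallback if fallback is not None else sheet_names[0]
-- ===== Notes on version B (the rewrite author's own statement) =====
-- stated objective: alternative
-- what changed: Replaces A's two sequential scans over sheet_names by a single pass that returns channel matches immediately and maintains a first-common-name fallback used after the loop.
-- outside the precondition, e.g. on _choose_sheet([]): A raises IndexError, B raises IndexError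
import Mathlib
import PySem

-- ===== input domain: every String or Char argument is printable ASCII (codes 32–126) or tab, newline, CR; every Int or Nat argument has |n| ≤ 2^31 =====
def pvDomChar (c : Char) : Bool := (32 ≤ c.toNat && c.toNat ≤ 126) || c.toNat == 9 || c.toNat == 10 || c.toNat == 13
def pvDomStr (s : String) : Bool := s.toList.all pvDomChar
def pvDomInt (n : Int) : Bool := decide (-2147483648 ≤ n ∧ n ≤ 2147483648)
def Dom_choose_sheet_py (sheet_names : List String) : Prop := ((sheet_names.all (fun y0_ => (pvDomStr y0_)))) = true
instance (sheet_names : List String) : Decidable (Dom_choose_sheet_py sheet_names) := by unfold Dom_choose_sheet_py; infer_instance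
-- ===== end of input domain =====

-- B does the same work in one pass with a maintained fallback instead of A's two scans; same O(n) cost (objective: alternative).
-- On the empty list both Pythons raise IndexError; Pre_ excludes it.

-- ===== PORT A =====
-- first loop of A: first name whose lowercase starts with "channel"
def pvA_find1 : List String → Option String
  | [] => none
  | n :: t =>
    if PySem.Str.startswith (PySem.Str.lower n) "channel" then some n else pvA_find1 t

-- second loop of A: first name whose lowercase is one of the common names
def pvA_find2 : List String → Option String
  | [] => none
  | n :: t =>
    let nl := PySem.Str.lower n
    if nl = "data" ∨ nl = "test" ∨ nl = "record" ∨ nl = "results" then some n else pvA_find2 t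

def choose_sheet_py (sheet_names : List String) : String :=
  match pvA_find1 sheet_names with
  | some n => n
  | none =>
    match pvA_find2 sheet_names with
    | some n => n
    | none => (PySem.List.pyGet? sheet_names 0).getD ""   -- sheet_names[0]; none (IndexError) excluded by Pre_

-- ===== PORT B =====
-- B's single loop: early return on a channel name (some n), otherwise carry the fallback
def pvB_go : List String → Option String → Option String
  | [], fallback => fallback
  | n :: t, fallback =>
    let nl := PySem.Str.lower n
    if PySem.Str.startswith nl "channel" then some n
    else if fallback = none ∧ (nl = "data" ∨ nl = "test" ∨ nl = "record" ∨ nl = "results") then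
      pvB_go t (some n)
    else
      pvB_go t fallback

def choose_sheet_py_alt (sheet_names : List String) : String :=
  match pvB_go sheet_names none with
  | some n => n
  | none => (PySem.List.pyGet? sheet_names 0).getD ""   -- sheet_names[0]; none (IndexError) excluded by Pre_

-- ===== PRECONDITION & SPEC =====
-- A (and B) raise IndexError via sheet_names[0] on the empty list; Pre_ excludes exactly that.
def Pre_choose_sheet_py (sheet_names : List String) : Prop := sheet_names ≠ []
instance (sheet_names : List String) : Decidable (Pre_choose_sheet_py sheet_names) := by unfold Pre_choose_sheet_py; infer_instance
def pvWitness_choose_sheet_py : List String := ["Sheet1", "Data"]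

def Spec_choose_sheet_py (sheet_names : List String) (out : String) : Prop := out = choose_sheet_py_alt sheet_names
instance (sheet_names : List String) (out : String) : Decidable (Spec_choose_sheet_py sheet_names out) := by unfold Spec_choose_sheet_py; infer_instance

-- ===== CLAIM (what is proved, stated in full; the proofs are below) =====
def Claim_equal_choose_sheet_py : Prop := ∀ (sheet_names : List String), Dom_choose_sheet_py sheet_names → Pre_choose_sheet_py sheet_names → Spec_choose_sheet_py sheet_names (choose_sheet_py sheet_names)

-- ===== LEMMAS AND PROOFS =====

-- B's loop, characterised by A's two scans: a channel match wins; otherwise a pre-set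
-- fallback is returned; otherwise the first common-name match.
theorem pvB_go_eq (xs : List String) : ∀ fb : Option String,
    pvB_go xs fb = match pvA_find1 xs with
      | some c => some c
      | none => match fb with
        | some f => some f
        | none => pvA_find2 xs := by
  induction xs with
  | nil => intro fb; cases fb <;> rfl
  | cons n t ih =>
    intro fb
    by_cases hc : PySem.Chars.startswith (PySem.Chars.lower n.toList)
        ['c', 'h', 'a', 'n', 'n', 'e', 'l'] = true
    all_goals by_cases hm : (PySem.Str.lower n) = "data" ∨ (PySem.Str.lower n) = "test" ∨
        (PySem.Str.lower n) = "record" ∨ (PySem.Str.lower n) = "results"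
    all_goals cases fb
    all_goals simp [pvB_go, pvA_find1, pvA_find2, hc, hm, ih]

-- ===== VERDICT (by name: the statement is the Claim_ definition above) =====
theorem choose_sheet_py_spec : Claim_equal_choose_sheet_py := by
  intro xs _ _
  unfold Spec_choose_sheet_py choose_sheet_py choose_sheet_py_alt
  rw [pvB_go_eq]
  cases h1 : pvA_find1 xs <;> cases h2 : pvA_find2 xs <;> rfl
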